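-- pv_equiv track=rewrite | github.com/gustnv/cffs-sat | cffs-sat/remodeling/main.py | is_cff
-- ===== SOURCE A (Python) =====
-- def is_subset(block1, block2):
--     block2_set = set(block2)
--     for elem in block1:
--         if elem not in block2_set:
--             return False
--     return True
--
-- def union(blocks):
--     union_set = set()
--     for block in blocks:
--         union_set.update(block)
--     return list(union_set)
--
-- def is_cff(blocks, d):
--     n = len(blocks)
--     for i in range(n):
--         for j in range(1 << n):
--             selected_blocks = []
--             for k in range(n):
--                 if (j & (1 << k)) != 0 and k != i:
--                     selected_blocks.append(blocks[k])
--             if len(selected_blocks) == d: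
--                 if is_subset(blocks[i], union(selected_blocks)):
--                     return False
--     return True
-- ===== SOURCE B (Python) =====
-- def is_cff(blocks, d):
--     if d < 0:
--         return True
--     n = len(blocks)
--
--     def combos(items, r):
--         if r == 0:
--             yield []
--         elif len(items) >= r:
--             first, rest = items[0], items[1:]
--             for tail in combos(rest, r - 1):
--                 yield [first] + tail
--             yield from combos(rest, r)
--
--     for i in range(n):
--         others = blocks[:i] + blocks[i + 1:]
--         for sel in combos(others, d):
--             covered = set()
--             for b in sel:
--                 covered.update(b)
--             if all(e in covered for e in blocks[i]):
--                 return False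
--     return True
-- ===== Notes on version B (the rewrite author's own statement) =====
-- stated objective: faster
-- what changed: B enumerates only the size-d combinations of the other blocks (recursive combination generator with early exit) instead of scanning all 2^n bitmasks and rebuilding the selection for each mask.
import Mathlib
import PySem

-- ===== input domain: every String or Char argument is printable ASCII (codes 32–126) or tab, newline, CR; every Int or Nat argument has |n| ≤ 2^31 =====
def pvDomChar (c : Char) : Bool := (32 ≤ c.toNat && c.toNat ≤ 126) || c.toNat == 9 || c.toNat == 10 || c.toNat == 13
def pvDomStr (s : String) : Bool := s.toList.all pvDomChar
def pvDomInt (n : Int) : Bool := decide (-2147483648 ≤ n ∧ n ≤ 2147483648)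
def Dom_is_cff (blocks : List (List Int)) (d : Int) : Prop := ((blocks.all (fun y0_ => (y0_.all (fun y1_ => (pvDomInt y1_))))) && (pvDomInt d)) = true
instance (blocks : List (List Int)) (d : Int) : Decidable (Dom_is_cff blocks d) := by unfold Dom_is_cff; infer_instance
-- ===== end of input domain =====

-- B replaces A's enumeration of all 2^n bitmasks by direct enumeration of the
-- size-d combinations of the other blocks: asymptotically faster (O(n·C(n-1,d)·…) vs O(n·2^n·n·…)).

-- ===== PORT A =====
-- 'is_subset(block1, block2)'
def is_subsetA (block1 block2 : List Int) : Bool :=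
  let block2_set := PySem.Set.ofList block2
  block1.all (fun elem => PySem.Set.contains block2_set elem)

-- 'union(blocks)' — returns list(union_set); downstream use is order-insensitive (membership only)
def unionA (blocks : List (List Int)) : List Int :=
  blocks.foldl (fun union_set block => PySem.Set.update union_set block) PySem.Set.empty

def is_cff (blocks : List (List Int)) (d : Int) : Bool :=
  let n : Int := PySem.List.len blocks
  -- the early-returning double loop is the Bool 'any'; i, j, k ≥ 0 so '.toNat' in shifts is exact
  !((PySem.List.pyRange 0 n 1).any (fun i =>
      (PySem.List.pyRange 0 ((1:Int) <<< n.toNat) 1).any (fun j =>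
        let selected_blocks : List (List Int) :=
          (PySem.List.pyRange 0 n 1).foldl
            (fun acc k =>
              if PySem.Int.band j ((1:Int) <<< k.toNat) ≠ 0 ∧ k ≠ i
              then acc ++ [PySem.List.pyGetD blocks k []] else acc) []
        if PySem.List.len selected_blocks = d then
          is_subsetA (PySem.List.pyGetD blocks i []) (unionA selected_blocks)
        else false)))

-- ===== PORT B =====
-- generator 'combos(items, r)' from Source B; the '[] => []' arm is Python-unreachable (r>0 ∧ len≥r ⇒ items ≠ [])
def combosB (items : List (List Int)) (r : Int) : List (List (List Int)) :=
  if r = 0 then [[]]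
  else if (PySem.List.len items) ≥ r then
    match items with
    | [] => []
    | first :: rest =>
      ((combosB rest (r - 1)).map (fun tail => first :: tail)) ++ combosB rest r
  else []
termination_by items.length
decreasing_by all_goals simp_all

def is_cff_alt (blocks : List (List Int)) (d : Int) : Bool :=
  if d < 0 then true
  else
    let n : Int := PySem.List.len blocks
    !((PySem.List.pyRange 0 n 1).any (fun i =>
        let others := PySem.List.slice blocks none (some i) ++
                      PySem.List.slice blocks (some (i + 1)) none
        (combosB others d).any (fun sel =>
          let covered := sel.foldl (fun acc b => PySem.Set.update acc b) PySem.Set.empty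
          (PySem.List.pyGetD blocks i []).all (fun e => PySem.Set.contains covered e))))

-- ===== PRECONDITION & SPEC =====
def Spec_is_cff (blocks : List (List Int)) (d : Int) (out : Bool) : Prop := out = is_cff_alt blocks d
instance (blocks : List (List Int)) (d : Int) (out : Bool) : Decidable (Spec_is_cff blocks d out) := by unfold Spec_is_cff; infer_instance

-- ===== CLAIM (what is proved, stated in full; the proofs are below) =====
def Claim_equal_is_cff : Prop := ∀ (blocks : List (List Int)) (d : Int), Dom_is_cff blocks d → Spec_is_cff blocks d (is_cff blocks d)

-- ===== LEMMAS AND PROOFS =====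

-- 'blocks covered by sel': every element of b lies in some block of sel
def CoverP (b : List Int) (sel : List (List Int)) : Prop := ∀ e ∈ b, ∃ blk ∈ sel, e ∈ blk

theorem mem_foldl_update (l : List (List Int)) (s : PySem.Set Int) (e : Int) :
    e ∈ l.foldl (fun acc b => PySem.Set.update acc b) s ↔ e ∈ s ∨ ∃ b ∈ l, e ∈ b := by
  induction l generalizing s with
  | nil => simp
  | cons x xs ih =>
    simp only [List.foldl_cons, ih, PySem.Set.mem_update, List.mem_cons]
    constructor
    · rintro ((h | h) | ⟨b, hb, hbe⟩)
      · exact Or.inl h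
      · exact Or.inr ⟨x, Or.inl rfl, h⟩
      · exact Or.inr ⟨b, Or.inr hb, hbe⟩
    · rintro (h | ⟨b, (rfl | hb), hbe⟩)
      · exact Or.inl (Or.inl h)
      · exact Or.inl (Or.inr hbe)
      · exact Or.inr ⟨b, hb, hbe⟩

theorem is_subsetA_union (b : List Int) (sel : List (List Int)) :
    is_subsetA b (unionA sel) = true ↔ CoverP b sel := by
  simp only [is_subsetA, unionA, CoverP, List.all_eq_true, PySem.Set.contains_iff,
    PySem.Set.mem_ofList, mem_foldl_update]
  constructor
  · intro h e he
    rcases h e he with h | h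
    · simp [PySem.Set.empty] at h
    · exact h
  · intro h e he
    exact Or.inr (h e he)

theorem coveredB_iff (b : List Int) (sel : List (List Int)) :
    (b.all (fun e => PySem.Set.contains
      (sel.foldl (fun acc bl => PySem.Set.update acc bl) PySem.Set.empty) e) = true) ↔ CoverP b sel := by
  simp only [CoverP, List.all_eq_true, PySem.Set.contains_iff, mem_foldl_update]
  constructor
  · intro h e he
    rcases h e he with h | h
    · simp [PySem.Set.empty] at h
    · exact h
  · intro h e he
    exact Or.inr (h e he)

theorem mem_combosB (items : List (List Int)) (r : Int) (hr : 0 ≤ r) (s : List (List Int)) :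
    s ∈ combosB items r ↔ s.Sublist items ∧ (s.length : Int) = r := by
  induction items generalizing r s with
  | nil =>
    rw [combosB]
    by_cases h0 : r = 0
    · subst h0
      simp [List.sublist_nil, List.length_eq_zero_iff]
    · simp only [if_neg h0]
      simp only [PySem.List.len_eq, List.length_nil, Nat.cast_zero]
      constructor
      · intro h; split at h <;> simp at h
      · rintro ⟨hs, hl⟩
        rw [List.sublist_nil] at hs
        subst hs; simp at hl; omega
  | cons x rest ih =>
    rw [combosB]
    by_cases h0 : r = 0
    · subst h0
      constructor
      · intro hmem
        rw [if_pos rfl] at hmem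
        simp only [List.mem_singleton] at hmem
        subst hmem
        exact ⟨List.nil_sublist _, rfl⟩
      · rintro ⟨_, hl⟩
        rw [if_pos rfl]
        have hz : s.length = 0 := by exact_mod_cast hl
        simp [List.length_eq_zero_iff.mp hz]
    · simp only [if_neg h0]
      have hr1 : 1 ≤ r := by omega
      by_cases hlen : (PySem.List.len (x :: rest)) ≥ r
      · simp only [if_pos hlen, List.mem_append, List.mem_map]
        simp only [ih (r - 1) (by omega), ih r hr]
        rw [List.sublist_cons_iff]
        constructor
        · rintro (⟨t, ⟨ht, htl⟩, rfl⟩ | ⟨hs, hl⟩)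
          · exact ⟨Or.inr ⟨t, rfl, ht⟩, by simp; omega⟩
          · exact ⟨Or.inl hs, hl⟩
        · rintro ⟨hs | ⟨t, rfl, ht⟩, hl⟩
          · exact Or.inr ⟨hs, hl⟩
          · exact Or.inl ⟨t, ⟨ht, by simp at hl; omega⟩, rfl⟩
      · simp only [if_neg hlen]
        simp only [List.not_mem_nil, false_iff, not_and]
        intro hs hl
        have := hs.length_le
        simp only [PySem.List.len_eq, ge_iff_le, not_le] at hlen
        omega

-- which subsets of indices a bitmask can select
theorem masks_exists (n : ℕ) (q : ℕ → Bool) (t : List ℕ) :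
    (∃ jn : ℕ, jn < 2 ^ n ∧ (List.range n).filter (fun k => jn.testBit k && q k) = t) ↔
      t.Sublist ((List.range n).filter q) := by
  constructor
  · rintro ⟨jn, _, rfl⟩
    exact List.monotone_filter_right _ (fun a h => by
      simp only [Bool.and_eq_true] at h; exact h.2)
  · intro ht
    induction n generalizing t with
    | zero =>
      simp only [List.range_zero, List.filter_nil, List.sublist_nil] at ht
      exact ⟨0, by simp, by simp [ht]⟩
    | succ n ihn =>
      rw [List.range_succ, List.filter_append] at ht
      rcases List.sublist_append_iff.mp ht with ⟨t₁, t₂, rfl, h₁, h₂⟩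
      rcases ihn t₁ h₁ with ⟨j₁, hj₁, hf₁⟩
      by_cases hqn : q n
      · have h₂' : t₂ = [] ∨ t₂ = [n] := by
          simp only [List.filter_cons, hqn, List.filter_nil] at h₂
          rcases List.sublist_cons_iff.mp h₂ with h | ⟨r, rfl, hr⟩
          · exact Or.inl (List.sublist_nil.mp h)
          · simp [List.sublist_nil.mp hr]
        rcases h₂' with rfl | rfl
        · -- bit n off
          refine ⟨j₁, by have := Nat.pow_lt_pow_right (a := 2) (by omega) (Nat.lt_succ_self n); omega, ?_⟩
          rw [List.range_succ, List.filter_append, hf₁]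
          have : (List.filter (fun k => j₁.testBit k && q k) [n]) = [] := by
            simp [Nat.testBit_lt_two_pow hj₁]
          simp [this]
        · -- bit n on
          refine ⟨2 ^ n + j₁, by omega, ?_⟩
          rw [List.range_succ, List.filter_append]
          have hlow : (List.range n).filter (fun k => (2 ^ n + j₁).testBit k && q k) =
              (List.range n).filter (fun k => j₁.testBit k && q k) := by
            apply List.filter_congr
            intro k hk
            rw [List.mem_range] at hk
            rw [Nat.testBit_two_pow_add_gt hk]
          have hhi : (List.filter (fun k => (2 ^ n + j₁).testBit k && q k) [n]) = [n] := by
            simp [Nat.testBit_two_pow_add_eq, Nat.testBit_lt_two_pow hj₁, hqn]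
          rw [hlow, hf₁, hhi]
      · have ht₂ : t₂ = [] := by
          simp only [List.filter_cons, hqn, List.filter_nil] at h₂
          exact List.sublist_nil.mp (by simpa using h₂)
        subst ht₂
        refine ⟨j₁, by have := Nat.pow_lt_pow_right (a := 2) (by omega) (Nat.lt_succ_self n); omega, ?_⟩
        rw [List.range_succ, List.filter_append, hf₁]
        have : (List.filter (fun k => j₁.testBit k && q k) [n]) = [] := by
          simp [hqn]
        simp [this]

theorem take_eq_map_range (blocks : List (List Int)) (i : ℕ) (h : i ≤ blocks.length) :
    blocks.take i = (List.range i).map (fun k => blocks.getD k []) := by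
  apply List.ext_getElem
  · simp [h]
  · intro k h1 h2
    simp only [List.getElem_take, List.getElem_map, List.getElem_range]
    rw [List.getD_eq_getElem]

theorem drop_eq_map_range (blocks : List (List Int)) (i : ℕ) :
    blocks.drop i = (List.range (blocks.length - i)).map (fun k => blocks.getD (i + k) []) := by
  apply List.ext_getElem
  · simp
  · intro k h1 h2
    simp only [List.getElem_drop, List.getElem_map, List.getElem_range]
    rw [List.getD_eq_getElem]

theorem others_eq (blocks : List (List Int)) (ii : ℕ) (hii : ii < blocks.length) :
    PySem.List.slice blocks none (some (ii : Int)) ++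
      PySem.List.slice blocks (some ((ii : Int) + 1)) none =
      ((List.range blocks.length).filter (fun k => k ≠ ii)).map (fun k => blocks.getD k []) := by
  have hcast : ((ii : Int) + 1) = ((ii + 1 : ℕ) : Int) := by push_cast; ring
  rw [PySem.List.slice_to_natCast, hcast, PySem.List.slice_from_natCast]
  have hsplit : blocks.length = (ii + 1) + (blocks.length - ii - 1) := by omega
  have hrange : List.range blocks.length =
      (List.range ii ++ [ii]) ++ (List.range (blocks.length - ii - 1)).map (fun k => (ii + 1) + k) := by
    rw [← List.range_succ]
    conv_lhs => rw [hsplit]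
    rw [List.range_add]
  rw [hrange, List.filter_append, List.filter_append]
  have h1 : (List.range ii).filter (fun k => k ≠ ii) = List.range ii := by
    rw [List.filter_eq_self]
    intro a ha
    rw [List.mem_range] at ha
    simp; omega
  have h2 : List.filter (fun k => k ≠ ii) [ii] = [] := by simp
  have h3 : ((List.range (blocks.length - ii - 1)).map (fun k => (ii + 1) + k)).filter
      (fun k => k ≠ ii) = (List.range (blocks.length - ii - 1)).map (fun k => (ii + 1) + k) := by
    rw [List.filter_eq_self]
    intro a ha
    rw [List.mem_map] at ha
    rcases ha with ⟨k, _, rfl⟩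
    simp; omega
  rw [h1, h2, h3, List.map_append, List.map_map]
  rw [take_eq_map_range blocks ii (by omega), drop_eq_map_range blocks (ii + 1)]
  simp [Function.comp_def, Nat.sub_sub]

theorem cond_band (jn ii k : ℕ) :
    (decide (PySem.Int.band (jn : Int) ((1:Int) <<< ((((k : Int)).toNat : ℕ) : Int)) ≠ 0 ∧ ((k : Int)) ≠ ((ii : Int))))
      = (jn.testBit k && decide (k ≠ ii)) := by
  have h1 : ((k : Int)).toNat = k := Int.toNat_natCast k
  rw [h1, Int.one_shiftLeft, PySem.Int.band_natCast, Nat.and_two_pow]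
  cases htb : jn.testBit k <;> simp

theorem selected_eq (blocks : List (List Int)) (ii jn : ℕ) :
    (PySem.List.pyRange 0 (PySem.List.len blocks) 1).foldl
      (fun acc k =>
        if PySem.Int.band ((jn : Int)) ((1:Int) <<< k.toNat) ≠ 0 ∧ k ≠ ((ii : Int))
        then acc ++ [PySem.List.pyGetD blocks k []] else acc) []
    = ((List.range blocks.length).filter (fun k => jn.testBit k && decide (k ≠ ii))).map
        (fun k => blocks.getD k []) := by
  rw [PySem.List.foldl_append_ite
    (p := fun k => PySem.Int.band ((jn : Int)) ((1:Int) <<< k.toNat) ≠ 0 ∧ k ≠ ((ii : Int)))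
    (f := fun k => PySem.List.pyGetD blocks k [])]
  simp only [PySem.List.len_eq, PySem.List.pyRange_zero_natCast, List.filter_map,
    List.map_map, List.nil_append, Function.comp_def]
  rw [show (List.filter (fun x : ℕ => decide (PySem.Int.band ((jn:Int)) ((1:Int) <<< ((((x:Int)).toNat : ℕ) : Int)) ≠ 0 ∧ ((x:Int)) ≠ ((ii:Int)))) (List.range blocks.length))
      = List.filter (fun k => jn.testBit k && decide (k ≠ ii)) (List.range blocks.length) from
    List.filter_congr (fun k _ => cond_band jn ii k)]
  apply List.map_congr_left
  intro k _
  simp [PySem.List.pyGetD_natCast]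

theorem ite_cover (c : Prop) [Decidable c] (b : List Int) (sel : List (List Int)) :
    ((if c then is_subsetA b (unionA sel) else false) = true) ↔ c ∧ CoverP b sel := by
  split_ifs with h
  · simp [is_subsetA_union, h]
  · simp [h]

theorem inner_eq (blocks : List (List Int)) (d : Int) (hd : 0 ≤ d) (ii : ℕ)
    (hii : ii < blocks.length) :
    ((PySem.List.pyRange 0 ((1:Int) <<< (PySem.List.len blocks).toNat) 1).any (fun j =>
        let selected_blocks : List (List Int) :=
          (PySem.List.pyRange 0 (PySem.List.len blocks) 1).foldl
            (fun acc k =>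
              if PySem.Int.band j ((1:Int) <<< k.toNat) ≠ 0 ∧ k ≠ (ii : Int)
              then acc ++ [PySem.List.pyGetD blocks k []] else acc) []
        if PySem.List.len selected_blocks = d then
          is_subsetA (PySem.List.pyGetD blocks (ii : Int) []) (unionA selected_blocks)
        else false)) =
    ((combosB (PySem.List.slice blocks none (some (ii : Int)) ++
        PySem.List.slice blocks (some ((ii : Int) + 1)) none) d).any (fun sel =>
      (PySem.List.pyGetD blocks (ii : Int) []).all (fun e => PySem.Set.contains
        (sel.foldl (fun acc b => PySem.Set.update acc b) PySem.Set.empty) e))) := by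
  have hn : (PySem.List.len blocks) = (blocks.length : Int) := PySem.List.len_eq blocks
  rw [Bool.eq_iff_iff]
  simp only [List.any_eq_true]
  constructor
  · rintro ⟨j, hj, hcond⟩
    rw [PySem.List.mem_pyRange_one] at hj
    obtain ⟨hj0, hjlt⟩ := hj
    have hjcast : j = ((j.toNat : ℕ) : Int) := by omega
    rw [hjcast] at hcond
    rw [selected_eq blocks ii j.toNat] at hcond
    rw [ite_cover] at hcond
    obtain ⟨hlen, hcov⟩ := hcond
    set t := (List.range blocks.length).filter (fun k => (j.toNat).testBit k && decide (k ≠ ii)) with hT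
    refine ⟨t.map (fun k => blocks.getD k []), ?_, ?_⟩
    · rw [mem_combosB _ d hd]
      constructor
      · rw [others_eq blocks ii hii]
        apply List.Sublist.map
        exact (masks_exists blocks.length (fun k => decide (k ≠ ii)) t).mp
          ⟨j.toNat, by
            rw [hn, Int.shiftLeft_eq, one_mul] at hjlt
            simp only [Int.toNat_natCast] at hjlt
            have h2 : (j.toNat : ℤ) < ((2 ^ blocks.length : ℕ) : ℤ) := by push_cast; omega
            exact_mod_cast h2, rfl⟩
      · simpa [PySem.List.len_eq] using hlen
    · rw [coveredB_iff]
      exact hcov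
  · rintro ⟨sel, hmem, hcovB⟩
    rw [mem_combosB _ d hd] at hmem
    obtain ⟨hsub, hlen⟩ := hmem
    rw [others_eq blocks ii hii] at hsub
    obtain ⟨t, ht, rfl⟩ := List.sublist_map_iff.mp hsub
    obtain ⟨jn, hjn, hf⟩ :=
      (masks_exists blocks.length (fun k => decide (k ≠ ii)) t).mpr ht
    refine ⟨(jn : Int), ?_, ?_⟩
    · rw [PySem.List.mem_pyRange_one]
      refine ⟨by positivity, ?_⟩
      rw [hn, Int.shiftLeft_eq, one_mul]
      simp only [Int.toNat_natCast]
      exact_mod_cast hjn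
    · rw [show ((jn : Int)) = ((jn : ℕ) : Int) from rfl]
      rw [selected_eq blocks ii jn, hf, ite_cover]
      refine ⟨by simpa [PySem.List.len_eq] using hlen, ?_⟩
      rw [coveredB_iff] at hcovB
      exact hcovB

theorem any_congr_mem {α : Type} (l : List α) {p q : α → Bool} (h : ∀ a ∈ l, p a = q a) :
    l.any p = l.any q := by
  induction l with
  | nil => rfl
  | cons x xs ih =>
    simp only [List.any_cons, h x (by simp), ih (fun a ha => h a (by simp [ha]))]

theorem is_cff_eq (blocks : List (List Int)) (d : Int) :
    is_cff blocks d = is_cff_alt blocks d := by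
  by_cases hd : d < 0
  · simp only [is_cff, is_cff_alt, if_pos hd]
    rw [Bool.not_eq_true']
    rw [List.any_eq_false]
    intro i _
    simp only [Bool.not_eq_true]
    rw [List.any_eq_false]
    intro j _ hbody
    simp only [PySem.List.len_eq] at hbody
    split at hbody
    · rename_i h
      omega
    · simp at hbody
  · simp only [is_cff, is_cff_alt, if_neg hd]
    apply congrArg
    apply any_congr_mem
    intro i hi
    rw [PySem.List.mem_pyRange_one, PySem.List.len_eq] at hi
    have hieq : i = ((i.toNat : ℕ) : Int) := by omega
    rw [hieq]
    exact inner_eq blocks d (by omega) i.toNat (by omega)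

-- ===== VERDICT (by name: the statement is the Claim_ definition above) =====
theorem is_cff_spec : Claim_equal_is_cff := by
  intro blocks d _
  unfold Spec_is_cff
  exact is_cff_eq blocks d
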